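-- pv_equiv track=rewrite | github.com/pypi-data/pypi-mirror-78 | packages/sorno-py-scripts/sorno-py-scripts-0.48.6.tar.gz/sorno-py-scripts-0.48.6/scripts/sorno_protobuf_to_dict.py | protobuf_str_to_nested_list_str
-- ===== SOURCE A (Python) =====
-- def protobuf_str_to_nested_list_str(s, inside_protobuf):
--     new_str = ""
--     w = ""
--     in_quote = False
--     while s:
--         c = s[0]
--         if c == ":":
--             if in_quote:
--                 w += c
--             elif s.startswith(": {"):
--                 # we have a key in "w", and the value is a protobuf
--                 val, s = protobuf_str_to_nested_list_str(s[3:], True)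
--                 new_str += ",[%s, [%s]]" % (w, val)
--                 w = ""
--                 continue
--             else:
--                 # we have a key in "w", and the value is not protobuf
--                 val, s = protobuf_str_to_nested_list_str(s[2:], False)
--                 new_str += ",[%s, %s]" % (w, val)
--                 w = ""
--                 continue
--         elif c == "}":
--             if in_quote:
--                 w += c
--             else:
--                 if w:
--                     # we are at the last value of the last field of a protobuf
--                     return w, s[1:]
--                 else:
--                     # we are done with this protobuf
--                     return new_str.lstrip(','), s[1:]
--         elif c == '"':
--             in_quote = not in_quote
--             w += c
--         elif c == ' ' or c == '\n':
--             if in_quote: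
--                 w += c
--             elif w:
--                 if not inside_protobuf:
--                     return w, s[1:]
--         else:
--             w += c
--
--         s = s[1:]
--
--     if w:
--         new_str += w
--     return new_str.lstrip(','), s
-- ===== SOURCE B (Python) =====
-- def protobuf_str_to_nested_list_str(s, inside_protobuf):
--     # Iterative re-implementation: same left-to-right scan, but the self-recursion
--     # is replaced by an explicit stack of suspended parent frames.
--     stack = []  # frames (new_str, w, inside, nested); in_quote is always False at suspension
--     new_str = ""
--     w = ""
--     in_quote = False
--     inside = inside_protobuf
--
--     def popped(frame, val):
--         p_new, p_w, p_inside, nested = frame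
--         if nested:
--             return p_new + ",[%s, [%s]]" % (p_w, val), p_inside
--         return p_new + ",[%s, %s]" % (p_w, val), p_inside
--
--     while s:
--         c = s[0]
--         if c == ":" and not in_quote:
--             if s.startswith(": {"):
--                 stack.append((new_str, w, inside, True))
--                 s = s[3:]
--                 inside = True
--             else:
--                 stack.append((new_str, w, inside, False))
--                 s = s[2:]
--                 inside = False
--             new_str = ""
--             w = ""
--             continue
--         ret = None  # value produced by the current frame, if it finishes here
--         if c == "}" and not in_quote:
--             ret = w if w else new_str.lstrip(',')
--         elif c == '"':
--             in_quote = not in_quote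
--             w += c
--         elif (c == ' ' or c == '\n') and not in_quote:
--             if w and not inside:
--                 ret = w
--         elif c == ':' or c == '}' or c == ' ' or c == '\n':
--             w += c  # in-quote ':' '}' ' ' '\n'
--         else:
--             w += c
--         s = s[1:]
--         if ret is not None:
--             if not stack:
--                 return ret, s
--             new_str, inside = popped(stack.pop(), ret)
--             w = ""
--             in_quote = False
--
--     # input exhausted: finish the current frame, then cascade through the stack
--     res = (new_str + w).lstrip(',')
--     while stack:
--         ns, _ = popped(stack.pop(), res)
--         res = ns.lstrip(',')
--     return res, s
-- ===== Notes on version B (the rewrite author's own statement) =====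
-- stated objective: alternative
-- what changed: Replaced A's self-recursion (one call per nested ': {' / ': ' value) by a single non-recursive scan driven by an explicit stack of suspended parent frames (new_str, w, inside, nested), popped on '}' / value-ending whitespace / end of input with the same ',[%s, [%s]]' / ',[%s, %s]' combination.
import Mathlib
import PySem

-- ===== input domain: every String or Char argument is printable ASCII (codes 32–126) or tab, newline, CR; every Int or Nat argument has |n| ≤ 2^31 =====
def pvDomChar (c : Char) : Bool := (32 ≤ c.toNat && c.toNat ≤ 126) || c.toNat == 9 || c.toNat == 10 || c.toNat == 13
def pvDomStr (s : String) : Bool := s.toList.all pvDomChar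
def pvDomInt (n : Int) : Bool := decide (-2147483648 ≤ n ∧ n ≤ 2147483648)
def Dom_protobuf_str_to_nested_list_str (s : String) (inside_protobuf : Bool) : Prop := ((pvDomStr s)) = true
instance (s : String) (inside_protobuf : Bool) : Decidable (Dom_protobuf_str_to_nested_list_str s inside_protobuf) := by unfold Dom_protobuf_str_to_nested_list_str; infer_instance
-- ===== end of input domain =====

-- B replaces A's self-recursion by an explicit stack of suspended parent frames (same scan, different control structure); objective: alternative.

-- shared Python primitives: "".lstrip(',') and the two %-format literals
def pvLstripComma (l : List Char) : List Char := l.dropWhile (fun c => c == ',')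

def fmtNested (w val : List Char) : List Char :=
  [',', '['] ++ w ++ [',', ' ', '['] ++ val ++ [']', ']']

def fmtPlain (w val : List Char) : List Char :=
  [',', '['] ++ w ++ [',', ' '] ++ val ++ [']']

-- small termination lemmas cited by name inside the ports (kept tiny so the
-- definitions' proof terms stay small)
theorem pvLenLt (c : Char) (rest : List Char) : rest.length < (c :: rest).length := by simp

theorem pvDropLenLt (k : Nat) (c : Char) (rest : List Char) :
    (rest.drop k).length < (c :: rest).length := by
  simp only [List.length_drop, List.length_cons]
  exact Nat.lt_succ_of_le (Nat.sub_le _ _)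

theorem pvChildLt {m : Nat} {k : Nat} {rest : List Char} (c : Char)
    (h : m ≤ (rest.drop k).length) : m < (c :: rest).length := by simp at *; omega

theorem pvChildLe {m p : Nat} {k : Nat} {rest : List Char} (c : Char)
    (h1 : m ≤ p) (h2 : p ≤ (rest.drop k).length) : m ≤ (c :: rest).length := by
  simp at *; omega

-- ===== PORT A =====
-- literal transliteration of A: the while loop is the recursion on s, the
-- recursive python call is the same function; the subtype records that the
-- returned remainder is no longer than the input (needed for termination of
-- the 'continue' after the recursive call).
def aGo (s : List Char) (inside : Bool) (new_str w : List Char) (in_quote : Bool) :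
    {p : (List Char × List Char) // p.2.length ≤ s.length} :=
  match s with
  | [] =>
      ⟨(pvLstripComma (if w.isEmpty then new_str else new_str ++ w), []), by simp⟩
  | c :: rest =>
    if c = ':' then
      if in_quote then
        let r := aGo rest inside new_str (w ++ [c]) in_quote
        ⟨r.val, Nat.le_succ_of_le r.property⟩
      else if rest.take 2 = [' ', '{'] then
        let child := aGo (rest.drop 2) true [] [] false
        let r := aGo child.val.2 inside (new_str ++ fmtNested w child.val.1) [] in_quote
        ⟨r.val, pvChildLe c r.property child.property⟩
      else
        let child := aGo (rest.drop 1) false [] [] false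
        let r := aGo child.val.2 inside (new_str ++ fmtPlain w child.val.1) [] in_quote
        ⟨r.val, pvChildLe c r.property child.property⟩
    else if c = '}' then
      if in_quote then
        let r := aGo rest inside new_str (w ++ [c]) in_quote
        ⟨r.val, Nat.le_succ_of_le r.property⟩
      else if w.isEmpty then
        ⟨(pvLstripComma new_str, rest), Nat.le_succ _⟩
      else
        ⟨(w, rest), Nat.le_succ _⟩
    else if c = '"' then
      let r := aGo rest inside new_str (w ++ [c]) (!in_quote)
      ⟨r.val, Nat.le_succ_of_le r.property⟩
    else if c = ' ' ∨ c = '\n' then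
      if in_quote then
        let r := aGo rest inside new_str (w ++ [c]) in_quote
        ⟨r.val, Nat.le_succ_of_le r.property⟩
      else if ¬ w.isEmpty ∧ inside = false then
        ⟨(w, rest), Nat.le_succ _⟩
      else
        let r := aGo rest inside new_str w in_quote
        ⟨r.val, Nat.le_succ_of_le r.property⟩
    else
      let r := aGo rest inside new_str (w ++ [c]) in_quote
      ⟨r.val, Nat.le_succ_of_le r.property⟩
termination_by s.length
decreasing_by
  all_goals first
    | exact pvLenLt _ _
    | exact pvDropLenLt _ _ _
    | exact pvChildLt _ child.property

def protobuf_str_to_nested_list_str (s : String) (inside_protobuf : Bool) : String × String :=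
  let r := (aGo s.toList inside_protobuf [] [] false).val
  (String.ofList r.1, String.ofList r.2)

-- ===== PORT B =====
-- B's stack machine: a frame is (new_str, w, inside, nested)
def BFrame := List Char × List Char × Bool × Bool

-- combining a finished child's value into a popped parent frame
def popped (f : BFrame) (val : List Char) : List Char × Bool :=
  match f with
  | (pnew, pw, pinside, nested) =>
    if nested then (pnew ++ fmtNested pw val, pinside)
    else (pnew ++ fmtPlain pw val, pinside)

-- end-of-input cascade: pop every remaining frame
def bFinish : List BFrame → List Char → List Char
  | [], res => res
  | f :: fs, res => bFinish fs (pvLstripComma (popped f res).1)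

def bLoop (s : List Char) (stack : List BFrame) (new_str w : List Char)
    (in_quote inside : Bool) : List Char × List Char :=
  match s with
  | [] => (bFinish stack (pvLstripComma (new_str ++ w)), [])
  | c :: rest =>
    if c = ':' ∧ in_quote = false then
      if rest.take 2 = [' ', '{'] then
        bLoop (rest.drop 2) ((new_str, w, inside, true) :: stack) [] [] false true
      else
        bLoop (rest.drop 1) ((new_str, w, inside, false) :: stack) [] [] false false
    else if c = '}' ∧ in_quote = false then
      let val := if w.isEmpty then pvLstripComma new_str else w
      match stack with
      | [] => (val, rest)
      | f :: fs => bLoop rest fs (popped f val).1 [] false (popped f val).2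
    else if c = '"' then
      bLoop rest stack new_str (w ++ [c]) (!in_quote) inside
    else if (c = ' ' ∨ c = '\n') ∧ in_quote = false then
      if ¬ w.isEmpty ∧ inside = false then
        match stack with
        | [] => (w, rest)
        | f :: fs => bLoop rest fs (popped f w).1 [] false (popped f w).2
      else
        bLoop rest stack new_str w in_quote inside
    else
      bLoop rest stack new_str (w ++ [c]) in_quote inside
termination_by s.length
decreasing_by all_goals first
  | exact pvLenLt _ _
  | exact pvDropLenLt _ _ _

def protobuf_str_to_nested_list_str_alt (s : String) (inside_protobuf : Bool) : String × String :=
  let r := bLoop s.toList [] [] [] false inside_protobuf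
  (String.ofList r.1, String.ofList r.2)

-- ===== PRECONDITION & SPEC =====
def Spec_protobuf_str_to_nested_list_str (s : String) (inside_protobuf : Bool) (out : String × String) : Prop := out = protobuf_str_to_nested_list_str_alt s inside_protobuf
instance (s : String) (inside_protobuf : Bool) (out : String × String) : Decidable (Spec_protobuf_str_to_nested_list_str s inside_protobuf out) := by unfold Spec_protobuf_str_to_nested_list_str; infer_instance

-- ===== CLAIM (what is proved, stated in full; the proofs are below) =====
def Claim_equal_protobuf_str_to_nested_list_str : Prop := ∀ (s : String) (inside_protobuf : Bool), Dom_protobuf_str_to_nested_list_str s inside_protobuf → Spec_protobuf_str_to_nested_list_str s inside_protobuf (protobuf_str_to_nested_list_str s inside_protobuf)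

-- ===== LEMMAS AND PROOFS =====

-- resuming the suspended parents after the current frame produced (val, rest)
def resume : List BFrame → (List Char × List Char) → (List Char × List Char)
  | [], p => p
  | f :: fs, p => bLoop p.2 fs (popped f p.1).1 [] false (popped f p.1).2

theorem resume_nil_rest (stack : List BFrame) (v : List Char) :
    resume stack (v, []) = (bFinish stack v, []) := by
  induction stack generalizing v with
  | nil => rfl
  | cons f fs ih =>
    simp only [resume, bLoop, bFinish, List.append_nil]

theorem key_nil (stack : List BFrame) (new_str w : List Char) (in_quote inside : Bool) :
    bLoop [] stack new_str w in_quote inside =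
      resume stack (aGo [] inside new_str w in_quote).val := by
  rw [bLoop, aGo]
  have hw : (if w.isEmpty then new_str else new_str ++ w) = new_str ++ w := by
    cases w <;> simp
  rw [hw, resume_nil_rest]

theorem key (n : Nat) : ∀ (s : List Char) (stack : List BFrame) (new_str w : List Char)
    (in_quote inside : Bool), s.length ≤ n →
    bLoop s stack new_str w in_quote inside =
      resume stack (aGo s inside new_str w in_quote).val := by
  induction n with
  | zero =>
    intro s stack new_str w in_quote inside h
    have hs : s = [] := by cases s <;> simp_all
    subst hs
    exact key_nil stack new_str w in_quote inside
  | succ n ih =>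
    intro s stack new_str w in_quote inside h
    cases s with
    | nil => exact key_nil stack new_str w in_quote inside
    | cons c rest =>
      have hr : rest.length ≤ n := by simp at h; omega
      rw [bLoop.eq_def, aGo.eq_def]
      simp only []
      cases in_quote with
      | true =>
        by_cases h1 : c = ':'
        · subst h1; simp only [reduceIte, reduceCtorEq]
          exact ih rest stack new_str (w ++ [':']) true inside hr
        · by_cases h2 : c = '}'
          · subst h2; simp only [reduceIte, reduceCtorEq]
            simp [h1]
            exact ih rest stack new_str (w ++ ['}']) true inside hr
          · by_cases h3 : c = '"'
            · subst h3; simp [h1, h2]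
              exact ih rest stack new_str (w ++ ['"']) false inside hr
            · by_cases h4 : c = ' ' ∨ c = '\n'
              · simp [h1, h2, h3, h4]
                exact ih rest stack new_str (w ++ [c]) true inside hr
              · simp [h1, h2, h3, h4]
                exact ih rest stack new_str (w ++ [c]) true inside hr
      | false =>
        by_cases h1 : c = ':'
        · subst h1
          by_cases ht : rest.take 2 = [' ', '{']
          · simp only [ht, reduceIte, reduceCtorEq, and_self, if_true]
            have hd2 : (rest.drop 2).length ≤ n := by simp; omega
            rw [ih (rest.drop 2) ((new_str, w, inside, true) :: stack) [] [] false true hd2]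
            simp only [resume, popped, reduceIte]
            rw [ih ((aGo (rest.drop 2) true [] [] false).val.2) stack
                (new_str ++ fmtNested w ((aGo (rest.drop 2) true [] [] false).val.1)) [] false inside
                (le_trans (aGo (rest.drop 2) true [] [] false).property hd2)]
            rw [resume.eq_def]
            cases stack with
            | nil => rfl
            | cons f fs => obtain ⟨pn, pw, pi, ne⟩ := f; simp [popped]
          · simp only [ht, reduceCtorEq, and_self, if_true, if_false]
            have hd1 : (rest.drop 1).length ≤ n := by simp; omega
            rw [ih (rest.drop 1) ((new_str, w, inside, false) :: stack) [] [] false false hd1]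
            simp only [resume, popped, Bool.false_eq_true, if_false]
            rw [ih ((aGo (rest.drop 1) false [] [] false).val.2) stack
                (new_str ++ fmtPlain w ((aGo (rest.drop 1) false [] [] false).val.1)) [] false inside
                (le_trans (aGo (rest.drop 1) false [] [] false).property hd1)]
            rw [resume.eq_def]
            cases stack with
            | nil => rfl
            | cons f fs => obtain ⟨pn, pw, pi, ne⟩ := f; simp [popped]
        · by_cases h2 : c = '}'
          · subst h2
            simp only [h1, reduceIte, reduceCtorEq, and_self, if_true]
            cases stack with
            | nil => cases hw : w.isEmpty <;> simp [resume]
            | cons f fs => cases hw : w.isEmpty <;> simp [resume]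
          · by_cases h3 : c = '"'
            · subst h3; simp [h1, h2]
              exact ih rest stack new_str (w ++ ['"']) true inside hr
            · by_cases h4 : c = ' ' ∨ c = '\n'
              · by_cases h5 : ¬ w = [] ∧ inside = false
                · simp only [h4, if_true]
                  simp [h1, h2, h3, h5]
                  cases stack with
                  | nil => simp [resume]
                  | cons f fs => simp [resume]
                · simp [h1, h2, h3, h4, h5]
                  exact ih rest stack new_str w false inside hr
              · simp [h1, h2, h3, h4]
                exact ih rest stack new_str (w ++ [c]) false inside hr

-- ===== VERDICT (by name: the statement is the Claim_ definition above) =====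
theorem protobuf_str_to_nested_list_str_spec : Claim_equal_protobuf_str_to_nested_list_str := by
  intro s inside _
  unfold Spec_protobuf_str_to_nested_list_str protobuf_str_to_nested_list_str protobuf_str_to_nested_list_str_alt
  rw [key s.toList.length s.toList [] [] [] false inside (le_refl _)]
  rfl
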